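-- pv_equiv track=rewrite | github.com/Dom110/KI_AutoAgent | services/diagram_service.py | _generate_ascii_flowchart
-- ===== SOURCE A (Python) =====
-- from typing import List, Dict, Any, Optional
--
-- def _generate_ascii_flowchart(nodes: List[Dict[str, str]]) -> str:
--     """Generate simple ASCII flowchart"""
--     lines = []
--
--     for i, node in enumerate(nodes):
--         label = node.get('label', '')
--         node_type = node.get('type', 'process')
--
--         # Simple box representation
--         box_width = len(label) + 4
--         if node_type == 'decision':
--             lines.append(f"    /{'-' * (box_width - 2)}\\")
--             lines.append(f"   | {label} |")
--             lines.append(f"    \\{'-' * (box_width - 2)}/")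
--         else:
--             lines.append(f"   +{'-' * (box_width - 2)}+")
--             lines.append(f"   | {label} |")
--             lines.append(f"   +{'-' * (box_width - 2)}+")
--
--         # Add connector if not last node
--         if i < len(nodes) - 1:
--             lines.append("       |")
--             lines.append("       v")
--
--     return "\n".join(lines)
-- ===== SOURCE B (Python) =====
-- from typing import List, Dict, Any, Optional
--
-- def _generate_ascii_flowchart(nodes: List[Dict[str, str]]) -> str:
--     """Generate simple ASCII flowchart by iterating over output LINE indices:
--     line k belongs to node k//5; k%5 selects top border / label / bottom
--     border / connector '|' / connector 'v'.  The range bound 5*len(nodes)-2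
--     drops the trailing connector after the last node."""
--     def line(k):
--         i, r = divmod(k, 5)
--         if r == 3:
--             return "       |"
--         if r == 4:
--             return "       v"
--         node = nodes[i]
--         label = node.get('label', '')
--         if r == 1:
--             return f"   | {label} |"
--         dashes = '-' * (len(label) + 2)
--         if node.get('type', 'process') == 'decision':
--             return f"    /{dashes}\\" if r == 0 else f"    \\{dashes}/"
--         return f"   +{dashes}+"
--     return "\n".join(line(k) for k in range(5 * len(nodes) - 2))
-- ===== Notes on version B (the rewrite author's own statement) =====
-- stated objective: alternative
-- what changed: B iterates over output line indices k in range(5*len(nodes)-2) and decodes each line arithmetically (node = k//5, row kind = k%5), instead of A's per-node loop that assembles each 3-line box and branches on not-last-node for connectors.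
import Mathlib
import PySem

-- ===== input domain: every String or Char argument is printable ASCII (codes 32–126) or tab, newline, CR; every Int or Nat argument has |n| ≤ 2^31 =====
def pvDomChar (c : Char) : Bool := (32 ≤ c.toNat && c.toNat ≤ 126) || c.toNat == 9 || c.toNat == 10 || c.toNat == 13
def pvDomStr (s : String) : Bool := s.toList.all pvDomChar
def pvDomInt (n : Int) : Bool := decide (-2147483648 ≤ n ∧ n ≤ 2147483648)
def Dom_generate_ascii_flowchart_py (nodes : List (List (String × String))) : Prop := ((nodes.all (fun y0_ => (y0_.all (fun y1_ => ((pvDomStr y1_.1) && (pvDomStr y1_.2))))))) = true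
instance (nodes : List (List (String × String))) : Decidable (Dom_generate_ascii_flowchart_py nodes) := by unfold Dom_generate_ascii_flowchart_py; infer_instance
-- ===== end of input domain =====

-- B iterates over OUTPUT LINE indices k in range(5*len(nodes)-2), decoding k by divmod 5
-- (node k//5, row k%5: border/label/border/connector) instead of A's per-node box loop
-- with a last-element branch (objective: alternative decomposition).
-- Strings are ported on the List Char side (PySem.Chars), as PYSEM.md prescribes.

-- ===== PORT A =====
-- one loop step of A: append the 3 box lines, then the connector lines if i < len(nodes)-1
def pvStepA (n : Int) (lines : List (List Char)) (p : Int × List (String × String)) : List (List Char) :=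
  let node : PySem.Dict String String := PySem.Dict.mk p.2
  let label := (PySem.Dict.getD node "label" "").toList
  let node_type := PySem.Dict.getD node "type" "process"
  let box_width := PySem.Str.len (PySem.Dict.getD node "label" "") + 4
  let dashes := List.replicate (box_width - 2).toNat '-'
  let lines :=
    if node_type == "decision" then
      lines ++ ["    /".toList ++ dashes ++ "\\".toList,
                "   | ".toList ++ label ++ " |".toList,
                "    \\".toList ++ dashes ++ "/".toList]
    else
      lines ++ ["   +".toList ++ dashes ++ "+".toList,
                "   | ".toList ++ label ++ " |".toList,
                "   +".toList ++ dashes ++ "+".toList]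
  if p.1 < n - 1 then lines ++ ["       |".toList, "       v".toList] else lines

def generate_ascii_flowchart_py (nodes : List (List (String × String))) : String :=
  let lines := (PySem.List.enumerate nodes 0).foldl (pvStepA (nodes.length : Int)) []
  String.ofList (PySem.Chars.join ['\n'] lines)

-- ===== PORT B =====
-- B's helper line(k): decode k into (node index, row kind) by divmod 5.
-- nodes[i] is ported as pyGetD nodes i [] — exact here: line is only called with
-- 0 ≤ k < 5*len(nodes)-2, so i = k//5 is always in range and the default is never used.
def pvLineB (nodes : List (List (String × String))) (k : Int) : List Char :=
  let i := PySem.Int.floordiv k 5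
  let r := PySem.Int.mod k 5
  if r == 3 then "       |".toList
  else if r == 4 then "       v".toList
  else
    let node : PySem.Dict String String := PySem.Dict.mk (PySem.List.pyGetD nodes i [])
    let label := (PySem.Dict.getD node "label" "").toList
    if r == 1 then "   | ".toList ++ label ++ " |".toList
    else
      let dashes := List.replicate (label.length + 2) '-'
      if PySem.Dict.getD node "type" "process" == "decision" then
        (if r == 0 then "    /".toList ++ dashes ++ "\\".toList
         else "    \\".toList ++ dashes ++ "/".toList)
      else "   +".toList ++ dashes ++ "+".toList

def generate_ascii_flowchart_py_alt (nodes : List (List (String × String))) : String :=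
  String.ofList (PySem.Chars.join ['\n']
    ((PySem.List.pyRange 0 (5 * (nodes.length : Int) - 2) 1).map (pvLineB nodes)))

-- ===== PRECONDITION & SPEC =====
def Spec_generate_ascii_flowchart_py (nodes : List (List (String × String))) (out : String) : Prop := out = generate_ascii_flowchart_py_alt nodes
instance (nodes : List (List (String × String))) (out : String) : Decidable (Spec_generate_ascii_flowchart_py nodes out) := by unfold Spec_generate_ascii_flowchart_py; infer_instance

-- ===== CLAIM (what is proved, stated in full; the proofs are below) =====
def Claim_equal_generate_ascii_flowchart_py : Prop := ∀ (nodes : List (List (String × String))), Dom_generate_ascii_flowchart_py nodes → Spec_generate_ascii_flowchart_py nodes (generate_ascii_flowchart_py nodes)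

-- ===== LEMMAS AND PROOFS =====

-- the three box lines of a node, as A produces them
def pvBox3 (nd : List (String × String)) : List (List Char) :=
  let d : PySem.Dict String String := PySem.Dict.mk nd
  let label := (PySem.Dict.getD d "label" "").toList
  let dashes := List.replicate (label.length + 2) '-'
  if PySem.Dict.getD d "type" "process" == "decision" then
    ["    /".toList ++ dashes ++ "\\".toList,
     "   | ".toList ++ label ++ " |".toList,
     "    \\".toList ++ dashes ++ "/".toList]
  else
    ["   +".toList ++ dashes ++ "+".toList,
     "   | ".toList ++ label ++ " |".toList,
     "   +".toList ++ dashes ++ "+".toList]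

-- A's final line list, described recursively
def pvLinesA : List (List (String × String)) → List (List Char)
  | [] => []
  | [x] => pvBox3 x
  | x :: y :: r => pvBox3 x ++ ["       |".toList, "       v".toList] ++ pvLinesA (y :: r)

theorem pvStepA_eq (n : Int) (lines : List (List Char)) (p : Int × List (String × String)) :
    pvStepA n lines p =
      (lines ++ pvBox3 p.2) ++ (if p.1 < n - 1 then ["       |".toList, "       v".toList] else []) := by
  simp only [pvStepA, pvBox3, PySem.Str.len_eq]
  have h : ((((PySem.Dict.getD (PySem.Dict.mk p.2) "label" "").toList.length : Int) + 4 - 2)).toNat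
      = (PySem.Dict.getD (PySem.Dict.mk p.2) "label" "").toList.length + 2 := by omega
  rw [h]
  split <;> split <;> simp

theorem pvFoldA (xs : List (List (String × String))) :
    ∀ (s n : Int) (acc : List (List Char)), n = s + xs.length →
      (PySem.List.enumerate xs s).foldl (pvStepA n) acc = acc ++ pvLinesA xs := by
  induction xs with
  | nil => intro s n acc _; simp [PySem.List.enumerate_nil, pvLinesA]
  | cons x t ih =>
    intro s n acc hn
    rw [PySem.List.enumerate_cons, List.foldl_cons, pvStepA_eq]
    cases t with
    | nil =>
      have : ¬ (s < n - 1) := by simp at hn; omega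
      simp [PySem.List.enumerate_nil, pvLinesA, this]
    | cons y r =>
      have hlt : s < n - 1 := by simp at hn; omega
      rw [ih (s + 1) n _ (by simp at hn ⊢; omega)]
      simp [pvLinesA, hlt]

-- B's first three lines at a head node are A's box lines
theorem pvLineB_head3 (x : List (String × String)) (t : List (List (String × String))) :
    [pvLineB (x :: t) 0, pvLineB (x :: t) 1, pvLineB (x :: t) 2] = pvBox3 x := by
  have f0 : PySem.Int.floordiv 0 5 = 0 := by decide
  have f1 : PySem.Int.floordiv 1 5 = 0 := by decide
  have f2 : PySem.Int.floordiv 2 5 = 0 := by decide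
  have m0 : PySem.Int.mod 0 5 = 0 := by decide
  have m1 : PySem.Int.mod 1 5 = 1 := by decide
  have m2 : PySem.Int.mod 2 5 = 2 := by decide
  simp only [pvLineB, pvBox3, f0, f1, f2, m0, m1, m2, PySem.List.pyGetD_zero_cons]
  norm_num
  split <;> simp

-- B's connector lines
theorem pvLineB_conn (xs : List (List (String × String))) :
    pvLineB xs 3 = "       |".toList ∧ pvLineB xs 4 = "       v".toList := by
  constructor <;> simp [pvLineB]

-- shifting the line index by 5 drops the head node
theorem pvLineB_shift (x : List (String × String)) (t : List (List (String × String))) (k : Nat) :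
    pvLineB (x :: t) ((k + 5 : Nat) : Int) = pvLineB t ((k : Nat) : Int) := by
  have hf : PySem.Int.floordiv ((k + 5 : Nat) : Int) 5 = ((k / 5 + 1 : Nat) : Int) := by
    have h1 := PySem.Int.floordiv_natCast (k + 5) 5
    rw [Nat.add_div_right k (by norm_num)] at h1
    exact_mod_cast h1
  have hm : PySem.Int.mod ((k + 5 : Nat) : Int) 5 = ((k % 5 : Nat) : Int) := by
    have h1 := PySem.Int.mod_natCast (k + 5) 5
    rw [Nat.add_mod_right] at h1
    exact_mod_cast h1
  have hf0 : PySem.Int.floordiv ((k : Nat) : Int) 5 = ((k / 5 : Nat) : Int) := by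
    exact_mod_cast PySem.Int.floordiv_natCast k 5
  have hm0 : PySem.Int.mod ((k : Nat) : Int) 5 = ((k % 5 : Nat) : Int) := by
    exact_mod_cast PySem.Int.mod_natCast k 5
  have hg : PySem.List.pyGetD (x :: t) ((k / 5 + 1 : Nat) : Int) ([] : List (String × String))
      = PySem.List.pyGetD t ((k / 5 : Nat) : Int) ([] : List (String × String)) := by
    rw [PySem.List.pyGetD_natCast, PySem.List.pyGetD_natCast, List.getD_cons_succ]
  simp only [pvLineB, hf, hm, hf0, hm0, hg]

-- B's line list is A's line list
theorem pvMapB (xs : List (List (String × String))) :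
    (PySem.List.pyRange 0 (5 * (xs.length : Int) - 2) 1).map (pvLineB xs) = pvLinesA xs := by
  induction xs with
  | nil =>
    rw [show (5 * ((([] : List (List (String × String)))).length : Int) - 2) = -2 from by simp]
    rw [PySem.List.pyRange_one_eq_nil (by norm_num)]
    simp [pvLinesA]
  | cons x t ih =>
    cases t with
    | nil =>
      rw [show (5 * (((x :: ([] : List (List (String × String))))).length : Int) - 2) = 3 from by simp]
      rw [show PySem.List.pyRange 0 3 1 = [0, 1, 2] from by decide]
      show [pvLineB [x] 0, pvLineB [x] 1, pvLineB [x] 2] = pvLinesA [x]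
      rw [pvLineB_head3 x []]
      rfl
    | cons y r =>
      have hlen : ((x :: y :: r).length : Int) = (((y :: r).length : Int)) + 1 := by simp
      have hb : (5 : Int) ≤ 5 * ((x :: y :: r).length : Int) - 2 := by
        have h1 : (1 : Int) ≤ ((y :: r).length : Int) := by
          have := (y :: r).length_pos_of_ne_nil (by simp)
          omega
        rw [hlen]; omega
      rw [PySem.List.pyRange_one_append 0 5 (5 * ((x :: y :: r).length : Int) - 2) (by norm_num) hb,
          List.map_append]
      have hhead : (PySem.List.pyRange 0 5 1).map (pvLineB (x :: y :: r))
          = pvBox3 x ++ ["       |".toList, "       v".toList] := by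
        rw [show PySem.List.pyRange 0 5 1 = [0, 1, 2, 3, 4] from by decide]
        have h3 := pvLineB_head3 x (y :: r)
        have hc := pvLineB_conn (x :: y :: r)
        simp only [List.map] at *
        rw [← h3, hc.1, hc.2]
        simp
      have htail : (PySem.List.pyRange 5 (5 * ((x :: y :: r).length : Int) - 2) 1).map (pvLineB (x :: y :: r))
          = pvLinesA (y :: r) := by
        rw [PySem.List.pyRange_one]
        have hnum : (5 * ((x :: y :: r).length : Int) - 2 - 5).toNat = (5 * (((y :: r).length : Int)) - 2).toNat := by
          rw [hlen]; omega
        rw [hnum, ← ih, PySem.List.pyRange_one, List.map_map, List.map_map]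
        rw [show (5 * (((y :: r).length : Int)) - 2 - 0) = 5 * (((y :: r).length : Int)) - 2 from by ring]
        apply List.map_congr_left
        intro k _
        simp only [Function.comp]
        rw [show (5 : Int) + (k : Int) = ((k + 5 : Nat) : Int) from by push_cast; ring,
            show (0 : Int) + (k : Int) = ((k : Nat) : Int) from by ring]
        exact pvLineB_shift x (y :: r) k
      rw [hhead, htail]
      simp [pvLinesA]

-- ===== VERDICT (by name: the statement is the Claim_ definition above) =====
theorem generate_ascii_flowchart_py_spec : Claim_equal_generate_ascii_flowchart_py := by
  intro nodes _
  show _ = _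
  unfold generate_ascii_flowchart_py generate_ascii_flowchart_py_alt
  rw [pvFoldA nodes 0 (nodes.length : Int) [] (by simp), List.nil_append, pvMapB]
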